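-- pv_equiv track=rewrite | github.com/dhh1128/minicss | getminu.py | cut_redundant_suffixes
-- ===== SOURCE A (Python) =====
-- def truncated_matches(combo, other_words):
--     for i in range(len(combo)):
--         if not other_words[i].startswith(combo[i]):
--             return False
--     return True
--
-- def cut_redundant_suffixes(first_answer, words_in_tokens_with_same_wordcount, token_idx):
--     shortest = first_answer
--     while len(shortest) > 1:
--         suffix = shortest[-1]
--         if len(suffix) > 1:
--             break
--         shorter = shortest[:-1]
--         for i in range(len(words_in_tokens_with_same_wordcount)):
--             if i != token_idx:
--                 other_words = words_in_tokens_with_same_wordcount[i]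
--                 if truncated_matches(shorter, other_words):
--                     return shortest
--         shortest = shorter
--     return shortest
-- ===== SOURCE B (Python) =====
-- def cut_redundant_suffixes(first_answer, words_in_tokens_with_same_wordcount, token_idx):
--     # One pass per word-list: compute the first prefix-mismatch index, keep the max,
--     # then compute the final kept length directly and slice once.
--     n = len(first_answer)
--     if n == 0:
--         return first_answer
--     k0 = 1  # shortest length reachable by the trailing single-char rule
--     for j in range(n - 1, 0, -1):
--         if len(first_answer[j]) > 1:
--             k0 = j + 1
--             break
--     best = -1  # max over other word-lists of their first mismatch index (capped at n-1)
--     for i, other in enumerate(words_in_tokens_with_same_wordcount):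
--         if i == token_idx:
--             continue
--         f = 0
--         while f < n - 1 and f < len(other) and other[f].startswith(first_answer[f]):
--             f += 1
--         if f > best:
--             best = f
--     return first_answer[:max(k0, min(n, best + 1))]
-- ===== Notes on version B (the rewrite author's own statement) =====
-- stated objective: alternative
-- what changed: Instead of repeatedly re-scanning every other word-list for each one-token-shorter prefix, B computes in one pass per word-list its first prefix-mismatch index, takes the maximum, and derives the final kept length in closed form (max of the trailing single-char bound and mismatch bound), slicing once.
import Mathlib
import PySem

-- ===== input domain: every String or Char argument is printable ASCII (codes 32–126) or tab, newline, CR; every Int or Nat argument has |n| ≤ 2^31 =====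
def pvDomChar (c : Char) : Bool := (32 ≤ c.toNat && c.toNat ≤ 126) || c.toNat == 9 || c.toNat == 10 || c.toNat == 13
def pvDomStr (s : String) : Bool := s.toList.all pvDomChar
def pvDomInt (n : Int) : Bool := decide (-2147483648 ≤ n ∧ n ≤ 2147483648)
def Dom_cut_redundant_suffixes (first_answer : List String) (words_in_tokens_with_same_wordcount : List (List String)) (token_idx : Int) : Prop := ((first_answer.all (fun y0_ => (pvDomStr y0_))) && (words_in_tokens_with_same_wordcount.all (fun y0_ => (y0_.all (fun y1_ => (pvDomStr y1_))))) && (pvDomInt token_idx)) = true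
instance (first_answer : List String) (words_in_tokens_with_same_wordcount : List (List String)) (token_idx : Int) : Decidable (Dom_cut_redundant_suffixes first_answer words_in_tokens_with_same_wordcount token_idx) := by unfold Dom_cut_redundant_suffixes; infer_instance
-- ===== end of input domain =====

-- B replaces A's repeated re-scan of all other word-lists per shrink step by one
-- mismatch-index pass per word-list and a closed-form final length (objective: alternative).

-- ===== PORT A =====
-- 'for i in range(len(combo)): if not other_words[i].startswith(combo[i]): return False'.
-- Python raises IndexError when other_words is shorter than combo and matches so far;
-- the port reads "" there instead, so it is faithful only inside Pre_ (which excludes that).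
def pvTmLoop (combo other_words : List String) (i : Nat) : Bool :=
  if i < combo.length then
    if ¬ (PySem.Str.startswith (other_words.getD i "") (combo.getD i "") = true) then false
    else pvTmLoop combo other_words (i + 1)
  else true
termination_by combo.length - i

def truncated_matches (combo other_words : List String) : Bool :=
  pvTmLoop combo other_words 0

-- the inner 'for i in range(len(words…)): if i != token_idx: … return shortest' scan
def pvScanLoop (shorter : List String) (words : List (List String)) (token_idx : Int) (i : Nat) : Bool :=
  if i < words.length then
    if ((i : Int) ≠ token_idx) ∧ truncated_matches shorter (words.getD i []) = true then true
    else pvScanLoop shorter words token_idx (i + 1)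
  else false
termination_by words.length - i

-- the 'while len(shortest) > 1' loop
def pvCrsLoop (words : List (List String)) (token_idx : Int) (shortest : List String) : List String :=
  if _h : shortest.length > 1 then
    let suffix := PySem.List.pyGetD shortest (-1) ""      -- shortest[-1], in range here
    if PySem.Str.len suffix > 1 then shortest
    else
      let shorter := PySem.List.slice shortest none (some (-1))   -- shortest[:-1]
      if pvScanLoop shorter words token_idx 0 then shortest
      else pvCrsLoop words token_idx shorter
  else shortest
termination_by shortest.length
decreasing_by simp only [PySem.List.slice_to_neg_one, List.length_dropLast]; omega

def cut_redundant_suffixes (first_answer : List String) (words_in_tokens_with_same_wordcount : List (List String)) (token_idx : Int) : List String :=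
  pvCrsLoop words_in_tokens_with_same_wordcount token_idx first_answer

-- ===== PORT B =====
-- 'for j in range(n - 1, 0, -1): if len(first_answer[j]) > 1: k0 = j + 1; break' (default 1)
def pvK0Loop (first_answer : List String) (j : Nat) : Nat :=
  if j = 0 then 1
  else if PySem.Str.len (first_answer.getD j "") > 1 then j + 1
  else pvK0Loop first_answer (j - 1)

-- 'while f < n - 1 and f < len(other) and other[f].startswith(first_answer[f]): f += 1'
def pvFLoop (first_answer other : List String) (nm1 : Nat) (f : Nat) : Nat :=
  if f < nm1 ∧ f < other.length ∧ PySem.Str.startswith (other.getD f "") (first_answer.getD f "") = true then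
    pvFLoop first_answer other nm1 (f + 1)
  else f
termination_by nm1 - f

-- 'for i, other in enumerate(…): if i == token_idx: continue; …; if f > best: best = f'
def pvBestLoop (first_answer : List String) (nm1 : Nat) (token_idx : Int) (ws : List (List String)) (i : Nat) (best : Int) : Int :=
  match ws with
  | [] => best
  | other :: rest =>
      if (i : Int) = token_idx then pvBestLoop first_answer nm1 token_idx rest (i + 1) best
      else
        let f : Int := (pvFLoop first_answer other nm1 0 : Int)
        pvBestLoop first_answer nm1 token_idx rest (i + 1) (if f > best then f else best)

def cut_redundant_suffixes_alt (first_answer : List String) (words_in_tokens_with_same_wordcount : List (List String)) (token_idx : Int) : List String :=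
  let n := first_answer.length
  if n = 0 then first_answer
  else
    let k0 : Int := (pvK0Loop first_answer (n - 1) : Int)
    let best := pvBestLoop first_answer (n - 1) token_idx words_in_tokens_with_same_wordcount 0 (-1)
    PySem.List.slice first_answer none (some (max k0 (min (n : Int) (best + 1))))   -- first_answer[:L]

-- ===== PRECONDITION & SPEC =====
-- Pre_ excludes exactly the inputs on which A's prefix check can raise IndexError: some
-- other word-list (index ≠ token_idx) is shorter than len(first_answer)-1 with no mismatch
-- before its end, while A does reach the scan (len(first_answer) > 1, trailing token of
-- length 1).  On a few excluded inputs A still returns (its early return hides the short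
-- list); B matches A there too (see the cite), but the ports' IndexError modelling differs.
def Pre_cut_redundant_suffixes (first_answer : List String) (words_in_tokens_with_same_wordcount : List (List String)) (token_idx : Int) : Prop :=
  first_answer.length ≤ 1 ∨
  1 < PySem.Str.len (first_answer.getD (first_answer.length - 1) "") ∨
  ∀ i < words_in_tokens_with_same_wordcount.length, (i : Int) ≠ token_idx →
    (first_answer.length ≤ (words_in_tokens_with_same_wordcount.getD i []).length + 1 ∨
     ∃ j < (words_in_tokens_with_same_wordcount.getD i []).length,
       ¬ (PySem.Str.startswith ((words_in_tokens_with_same_wordcount.getD i []).getD j "")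
            (first_answer.getD j "") = true))
instance (first_answer : List String) (words_in_tokens_with_same_wordcount : List (List String)) (token_idx : Int) : Decidable (Pre_cut_redundant_suffixes first_answer words_in_tokens_with_same_wordcount token_idx) := by unfold Pre_cut_redundant_suffixes; infer_instance

def pvWitness_cut_redundant_suffixes : List String × List (List String) × Int :=
  (["a", "b"], [["a", "x"], ["c", "d"]], 0)

def Spec_cut_redundant_suffixes (first_answer : List String) (words_in_tokens_with_same_wordcount : List (List String)) (token_idx : Int) (out : List String) : Prop := out = cut_redundant_suffixes_alt first_answer words_in_tokens_with_same_wordcount token_idx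
instance (first_answer : List String) (words_in_tokens_with_same_wordcount : List (List String)) (token_idx : Int) (out : List String) : Decidable (Spec_cut_redundant_suffixes first_answer words_in_tokens_with_same_wordcount token_idx out) := by unfold Spec_cut_redundant_suffixes; infer_instance

-- ===== CLAIM (what is proved, stated in full; the proofs are below) =====
def Claim_equal_cut_redundant_suffixes : Prop := ∀ (first_answer : List String) (words_in_tokens_with_same_wordcount : List (List String)) (token_idx : Int), Dom_cut_redundant_suffixes first_answer words_in_tokens_with_same_wordcount token_idx → Pre_cut_redundant_suffixes first_answer words_in_tokens_with_same_wordcount token_idx → Spec_cut_redundant_suffixes first_answer words_in_tokens_with_same_wordcount token_idx (cut_redundant_suffixes first_answer words_in_tokens_with_same_wordcount token_idx)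

-- ===== LEMMAS AND PROOFS =====

-- per-index match predicate shared by both characterizations
def pvM (fa w : List String) (j : Nat) : Prop :=
  PySem.Str.startswith (w.getD j "") (fa.getD j "") = true

theorem pv_take_getD (fa : List String) (c j : Nat) (h : j < c) :
    (fa.take c).getD j "" = fa.getD j "" := by
  simp [List.getD, h]

theorem pvTmLoop_char (combo other : List String) (i : Nat) :
    pvTmLoop combo other i = true ↔ ∀ j, i ≤ j → j < combo.length → pvM combo other j := by
  fun_induction pvTmLoop combo other i with
  | case1 i h hm =>
    simp only [Bool.false_eq_true, false_iff]
    intro hall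
    exact hm (hall i le_rfl h)
  | case2 i h hm ih =>
    rw [ih]
    constructor
    · intro hall j hj hjl
      rcases Nat.eq_or_lt_of_le hj with rfl | hlt
      · exact not_not.mp hm
      · exact hall j hlt hjl
    · intro hall j hj hjl; exact hall j (Nat.le_of_succ_le hj) hjl
  | case3 i h =>
    simp only [true_iff]
    intro j hj hjl
    exact absurd hjl (by omega)

theorem pvScanLoop_char (shorter : List String) (words : List (List String)) (tid : Int) (i : Nat) :
    pvScanLoop shorter words tid i = true ↔
      ∃ k, i ≤ k ∧ k < words.length ∧ (k : Int) ≠ tid ∧ truncated_matches shorter (words.getD k []) = true := by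
  fun_induction pvScanLoop shorter words tid i with
  | case1 i h hc =>
    simp only [true_iff]
    exact ⟨i, le_rfl, h, hc.1, hc.2⟩
  | case2 i h hc ih =>
    rw [ih]
    constructor
    · rintro ⟨k, hk1, hk2, hk3, hk4⟩; exact ⟨k, by omega, hk2, hk3, hk4⟩
    · rintro ⟨k, hk1, hk2, hk3, hk4⟩
      rcases Nat.eq_or_lt_of_le hk1 with rfl | hlt
      · exact absurd ⟨hk3, hk4⟩ hc
      · exact ⟨k, hlt, hk2, hk3, hk4⟩
  | case3 i h =>
    simp only [Bool.false_eq_true, false_iff]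
    rintro ⟨k, hk1, hk2, _⟩
    omega

theorem pvK0Loop_bounds (fa : List String) (j : Nat) :
    1 ≤ pvK0Loop fa j ∧ pvK0Loop fa j ≤ j + 1 := by
  fun_induction pvK0Loop fa j with
  | case1 => omega
  | case2 j h hb => omega
  | case3 j h hb ih => omega

theorem pvFLoop_matched (fa other : List String) (nm1 f : Nat) :
    ∀ j, f ≤ j → j < pvFLoop fa other nm1 f → pvM fa other j := by
  fun_induction pvFLoop fa other nm1 f with
  | case1 f hc ih =>
    intro j hj hjl
    rcases Nat.eq_or_lt_of_le hj with rfl | hlt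
    · exact hc.2.2
    · exact ih j hlt hjl
  | case2 f hc =>
    intro j hj hjl; omega

theorem pvFLoop_stop (fa other : List String) (nm1 f : Nat)
    (h : pvFLoop fa other nm1 f < nm1) :
    other.length ≤ pvFLoop fa other nm1 f ∨ ¬ pvM fa other (pvFLoop fa other nm1 f) := by
  fun_induction pvFLoop fa other nm1 f with
  | case1 f hc ih => exact ih h
  | case2 f hc =>
    by_cases hl : f < other.length
    · exact Or.inr fun hM => hc ⟨h, hl, hM⟩
    · exact Or.inl (by omega)

theorem pvFLoop_char (fa other : List String) (nm1 : Nat)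
    (hsafe : nm1 ≤ other.length ∨ ∃ j < other.length, ¬ pvM fa other j)
    (c : Nat) (hc : c ≤ nm1) :
    c ≤ pvFLoop fa other nm1 0 ↔ ∀ j < c, pvM fa other j := by
  constructor
  · intro h j hj
    exact pvFLoop_matched fa other nm1 0 j (Nat.zero_le j) (lt_of_lt_of_le hj h)
  · intro h
    by_contra hlt
    push Not at hlt
    have h1 : pvFLoop fa other nm1 0 < nm1 := lt_of_lt_of_le hlt hc
    rcases pvFLoop_stop fa other nm1 0 h1 with hlen | hM
    · rcases hsafe with hs | ⟨j, hj, hjM⟩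
      · omega
      · exact hjM (pvFLoop_matched fa other nm1 0 j (Nat.zero_le j) (by omega))
    · exact hM (h _ hlt)

theorem pvBestLoop_init_le (fa : List String) (nm1 : Nat) (tid : Int)
    (ws : List (List String)) (i : Nat) (best : Int) :
    best ≤ pvBestLoop fa nm1 tid ws i best := by
  induction ws generalizing i best with
  | nil => simp [pvBestLoop]
  | cons other rest ih =>
    rw [pvBestLoop]
    by_cases hi : (i : Int) = tid
    · rw [if_pos hi]; exact ih (i + 1) best
    · rw [if_neg hi]
      refine le_trans ?_ (ih (i + 1) _)
      split_ifs with hgt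
      · omega
      · exact le_rfl

theorem pvBestLoop_char (fa : List String) (nm1 : Nat) (tid : Int)
    (ws : List (List String)) (i : Nat) (best : Int) (c : Nat) :
    (c : Int) ≤ pvBestLoop fa nm1 tid ws i best ↔
      (c : Int) ≤ best ∨ ∃ k < ws.length, ((i + k : Nat) : Int) ≠ tid ∧ c ≤ pvFLoop fa (ws.getD k []) nm1 0 := by
  induction ws generalizing i best with
  | nil =>
    simp [pvBestLoop]
  | cons other rest ih =>
    rw [pvBestLoop]
    by_cases hi : (i : Int) = tid
    · rw [if_pos hi, ih]
      constructor
      · rintro (hb | ⟨k, hk, hne, hf⟩)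
        · exact Or.inl hb
        · exact Or.inr ⟨k + 1, by simpa using hk, by push_cast at hne ⊢; omega, by simpa using hf⟩
      · rintro (hb | ⟨k, hk, hne, hf⟩)
        · exact Or.inl hb
        · match k with
          | 0 => exact absurd (by simpa using hi) (by simpa using hne)
          | k + 1 =>
            refine Or.inr ⟨k, by simpa using hk, ?_, by simpa using hf⟩
            push_cast at hne ⊢; omega
    · rw [if_neg hi, ih]
      constructor
      · rintro (hb | ⟨k, hk, hne, hf⟩)
        · split_ifs at hb with hgt
          · refine Or.inr ⟨0, by simp, by simpa using hi, ?_⟩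
            simp only [List.getD_cons_zero]
            exact_mod_cast hb
          · exact Or.inl hb
        · exact Or.inr ⟨k + 1, by simpa using hk, by push_cast at hne ⊢; omega, by simpa using hf⟩
      · rintro (hb | ⟨k, hk, hne, hf⟩)
        · refine Or.inl ?_
          split_ifs with hgt
          · omega
          · exact hb
        · match k with
          | 0 =>
            refine Or.inl ?_
            simp only [List.getD_cons_zero] at hf
            split_ifs with hgt
            · exact_mod_cast hf
            · push Not at hgt
              have : (c : Int) ≤ (pvFLoop fa other nm1 0 : Int) := by exact_mod_cast hf
              omega
          | k + 1 =>
            refine Or.inr ⟨k, by simpa using hk, ?_, by simpa using hf⟩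
            push_cast at hne ⊢; omega

theorem pv_blocked_iff (fa : List String) (words : List (List String)) (tid : Int)
    (hsafe : ∀ i < words.length, (i : Int) ≠ tid →
      (fa.length ≤ (words.getD i []).length + 1 ∨
       ∃ j < (words.getD i []).length, ¬ pvM fa (words.getD i []) j))
    (c : Nat) (hc : c + 1 ≤ fa.length) :
    pvScanLoop (fa.take c) words tid 0 = true ↔
      (c : Int) ≤ pvBestLoop fa (fa.length - 1) tid words 0 (-1) := by
  have hn1 : c ≤ fa.length - 1 := by omega
  have hctake : (fa.take c).length = c := by simp [List.length_take]; omega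
  rw [pvScanLoop_char, pvBestLoop_char]
  constructor
  · rintro ⟨k, _, hk2, hk3, hk4⟩
    refine Or.inr ⟨k, hk2, by simpa using hk3, ?_⟩
    have hsk : fa.length - 1 ≤ (words.getD k []).length ∨
        ∃ j < (words.getD k []).length, ¬ pvM fa (words.getD k []) j := by
      rcases hsafe k hk2 hk3 with h | h
      · exact Or.inl (by omega)
      · exact Or.inr h
    rw [pvFLoop_char fa _ _ hsk c hn1]
    intro j hj
    have hh := (pvTmLoop_char (fa.take c) (words.getD k []) 0).mp hk4 j (Nat.zero_le j)
      (by rw [hctake]; exact hj)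
    unfold pvM at hh ⊢
    rwa [pv_take_getD fa c j hj] at hh
  · rintro (hb | ⟨k, hk, hne, hf⟩)
    · exfalso; omega
    · have hne' : (k : Int) ≠ tid := by simpa using hne
      refine ⟨k, Nat.zero_le k, hk, hne', ?_⟩
      have hsk : fa.length - 1 ≤ (words.getD k []).length ∨
          ∃ j < (words.getD k []).length, ¬ pvM fa (words.getD k []) j := by
        rcases hsafe k hk hne' with h | h
        · exact Or.inl (by omega)
        · exact Or.inr h
      rw [pvFLoop_char fa _ _ hsk c hn1] at hf
      rw [show truncated_matches (fa.take c) (words.getD k []) = pvTmLoop (fa.take c) (words.getD k []) 0 from rfl,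
        pvTmLoop_char]
      intro j _ hjl
      rw [hctake] at hjl
      have := hf j hjl
      unfold pvM at this ⊢
      rwa [pv_take_getD fa c j hjl]

theorem pv_main (fa : List String) (words : List (List String)) (tid : Int)
    (hsafe : ∀ i < words.length, (i : Int) ≠ tid →
      (fa.length ≤ (words.getD i []).length + 1 ∨
       ∃ j < (words.getD i []).length, ¬ pvM fa (words.getD i []) j)) :
    ∀ m, 1 ≤ m → m ≤ fa.length →
      pvCrsLoop words tid (fa.take m) =
        fa.take (Int.toNat (max ((pvK0Loop fa (m - 1) : Nat) : Int)
          (min (m : Int) (pvBestLoop fa (fa.length - 1) tid words 0 (-1) + 1)))) := by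
  intro m
  induction m with
  | zero => omega
  | succ k ih =>
    intro _ hle
    have hBge : (-1 : Int) ≤ pvBestLoop fa (fa.length - 1) tid words 0 (-1) :=
      pvBestLoop_init_le fa (fa.length - 1) tid words 0 (-1)
    set B := pvBestLoop fa (fa.length - 1) tid words 0 (-1) with hB
    have hlen_take : (fa.take (k + 1)).length = k + 1 := by
      simp [List.length_take]; omega
    rw [pvCrsLoop]
    by_cases hk1 : k = 0
    · subst hk1
      rw [dif_neg (by rw [hlen_take]; omega)]
      have hidx : Int.toNat (max ((pvK0Loop fa (1 - 1) : Nat) : Int) (min ((1 : Nat) : Int) (B + 1))) = 1 := by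
        have h1 : pvK0Loop fa 0 = 1 := by simp [pvK0Loop]
        rw [h1]
        omega
      rw [hidx]
    · rw [dif_pos (by rw [hlen_take]; omega)]
      have hsfx : PySem.List.pyGetD (fa.take (k + 1)) (-1) "" = fa.getD k "" := by
        rw [PySem.List.pyGetD_neg_ofNat (fa.take (k + 1)) 1 "" (by omega) (by rw [hlen_take]; omega)]
        have hk' : k < fa.length := by omega
        have : (fa.take (k + 1)).length - 1 = k := by omega
        simp only [this]
        rw [List.getElem_take, List.getD_eq_getElem fa "" hk']
      have hshort : PySem.List.slice (fa.take (k + 1)) none (some (-1)) = fa.take k := by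
        rw [PySem.List.slice_to_neg_one, List.dropLast_eq_take, hlen_take]
        rw [List.take_take]
        congr 1
        omega
      simp only [hsfx, hshort]
      have hK0step : pvK0Loop fa (k + 1 - 1) = if PySem.Str.len (fa.getD k "") > 1 then k + 1 else pvK0Loop fa (k - 1) := by
        simp only [Nat.add_sub_cancel]
        rw [pvK0Loop, if_neg hk1]
      by_cases hbig : PySem.Str.len (fa.getD k "") > 1
      · rw [if_pos hbig]
        rw [hK0step, if_pos hbig]
        congr 1
        omega
      · rw [if_neg hbig]
        rw [hK0step, if_neg hbig]
        have hbl := pv_blocked_iff fa words tid hsafe k (by omega)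
        rw [← hB] at hbl
        have hk0b := pvK0Loop_bounds fa (k - 1)
        by_cases hsc : pvScanLoop (fa.take k) words tid 0 = true
        · rw [if_pos hsc]
          have hkB : (k : Int) ≤ B := hbl.mp hsc
          congr 1
          push_cast
          omega
        · rw [if_neg (by simpa using hsc)]
          have hkB : ¬ (k : Int) ≤ B := fun h => hsc (hbl.mpr h)
          rw [ih (by omega) (by omega)]
          congr 1
          push_cast at hkB ⊢
          omega

-- ===== VERDICT (by name: the statement is the Claim_ definition above) =====
theorem cut_redundant_suffixes_spec : Claim_equal_cut_redundant_suffixes := by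
  intro fa words tid _hdom hpre
  unfold Spec_cut_redundant_suffixes cut_redundant_suffixes cut_redundant_suffixes_alt
  by_cases hn : fa.length = 0
  · have : fa = [] := List.length_eq_zero_iff.mp hn
    subst this
    simp [pvCrsLoop]
  · simp only [hn, ite_false]
    have hBge : (-1 : Int) ≤ pvBestLoop fa (fa.length - 1) tid words 0 (-1) :=
      pvBestLoop_init_le fa (fa.length - 1) tid words 0 (-1)
    have hk0b := pvK0Loop_bounds fa (fa.length - 1)
    by_cases hone : fa.length = 1
    · -- A never enters the loop; B's closed-form length is 1 = fa.length
      rw [pvCrsLoop, dif_neg (by omega)]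
      have hk01 : pvK0Loop fa (fa.length - 1) = 1 := by
        rw [hone]
        simp [pvK0Loop]
      rw [hk01, PySem.List.slice_to _ (by omega : (0 : Int) ≤ max ((1 : Nat) : Int)
        (min (fa.length : Int) (pvBestLoop fa (fa.length - 1) tid words 0 (-1) + 1)))]
      have hL1 : Int.toNat (max ((1 : Nat) : Int)
          (min (fa.length : Int) (pvBestLoop fa (fa.length - 1) tid words 0 (-1) + 1))) = 1 := by
        push_cast
        omega
      rw [hL1, show (1 : Nat) = fa.length from hone.symm, List.take_length]
    · have h2 : 2 ≤ fa.length := by omega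
      by_cases hbig : 1 < PySem.Str.len (fa.getD (fa.length - 1) "")
      · -- trailing token longer than one char: A breaks at once, B's k0 = fa.length
        have hsfx : PySem.List.pyGetD fa (-1) "" = fa.getD (fa.length - 1) "" := by
          rw [PySem.List.pyGetD_neg_ofNat fa 1 "" (by omega) (by omega)]
          exact (List.getD_eq_getElem fa "" (by omega)).symm
        rw [pvCrsLoop, dif_pos (by omega)]
        simp only [hsfx]
        rw [if_pos hbig]
        have hk0n : pvK0Loop fa (fa.length - 1) = fa.length := by
          rw [pvK0Loop, if_neg (by omega : ¬ (fa.length - 1 = 0)), if_pos hbig]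
          omega
        rw [hk0n, PySem.List.slice_to _ (by omega : (0 : Int) ≤ max ((fa.length : Nat) : Int)
          (min (fa.length : Int) (pvBestLoop fa (fa.length - 1) tid words 0 (-1) + 1)))]
        have hLn : Int.toNat (max ((fa.length : Nat) : Int)
            (min (fa.length : Int) (pvBestLoop fa (fa.length - 1) tid words 0 (-1) + 1))) = fa.length := by
          omega
        rw [hLn, List.take_length]
      · -- A scans: Pre_'s third disjunct applies
        have hsafe : ∀ i < words.length, (i : Int) ≠ tid →
            (fa.length ≤ (words.getD i []).length + 1 ∨
             ∃ j < (words.getD i []).length, ¬ pvM fa (words.getD i []) j) := by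
          rcases hpre with h | h | h
          · exact absurd h (by omega)
          · exact absurd h hbig
          · exact h
        have hmain := pv_main fa words tid hsafe fa.length (by omega) le_rfl
        rw [List.take_length] at hmain
        rw [hmain]
        have hL : (0 : Int) ≤ max ((pvK0Loop fa (fa.length - 1) : Nat) : Int)
            (min (fa.length : Int) (pvBestLoop fa (fa.length - 1) tid words 0 (-1) + 1)) := by
          omega
        rw [PySem.List.slice_to _ hL]
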